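-- pv_equiv track=rewrite | github.com/Papr-ai/memory-opensource | scripts/migration/add_relationships_v2.py | generate_relationships_for_node
-- ===== SOURCE A (Python) =====
-- RELATIONSHIPS = {
--     "CREATED_BY": {
--         "properties": "CreatedByProperties",
--         "sources": ["Memory", "Project", "Task", "Insight", "Code"],
--         "targets": ["Person"],
--     },
--     "WORKS_AT": {
--         "properties": "WorksAtProperties",
--         "sources": ["Person"],
--         "targets": ["Company"],
--     },
--     "ASSIGNED_TO": {
--         "properties": "AssignedToProperties",
--         "sources": ["Task"],
--         "targets": ["Person"],
--     },
--     "MANAGED_BY": {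
--         "properties": "ManagedByProperties",
--         "sources": ["Project"],
--         "targets": ["Person"],
--     },
--     "CONTAINS": {
--         "properties": "ContainsProperties",
--         "sources": ["Project", "Meeting"],
--         "targets": ["Task", "Insight", "Memory"],
--     },
--     "PARTICIPATED_IN": {
--         "properties": "ParticipatedInProperties",
--         "sources": ["Person"],
--         "targets": ["Meeting", "Project"],
--     },
--     "BELONGS_TO": {
--         "properties": "BelongsToProperties",
--         "sources": ["Task", "Insight", "Opportunity"],
--         "targets": ["Project", "Company"],
--     },
--     "RELATED_TO": {
--         "properties": "RelatedToProperties",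
--         "sources": ["Insight", "Memory", "Task", "Opportunity"],
--         "targets": ["Insight", "Memory", "Task", "Opportunity"],
--     },
--     "REFERENCES": {
--         "properties": "ReferencesProperties",
--         "sources": ["Insight", "Memory", "Code"],
--         "targets": ["Project", "Task", "Code"],
--     },
-- }
--
-- def generate_relationships_for_node(node_type: str) -> list[str]:
--     """Generate all relationship fields for a given node type"""
--     lines = []
--     lines.append("")
--     lines.append("  # ========================================")
--     lines.append(f"  # Relationships for {node_type}")
--     lines.append("  # ========================================")
--
--     # Outgoing relationships
--     for rel_name, rel_info in RELATIONSHIPS.items():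
--         if node_type in rel_info["sources"]:
--             for target in rel_info["targets"]:
--                 field_name = _to_camel_case(rel_name.lower()) + target
--                 lines.append(f"  # {rel_name}: {node_type} -> {target}")
--                 lines.append(
--                     f'  {field_name}: [{target}!]! @relationship(type: "{rel_name}", direction: OUT, properties: "{rel_info["properties"]}")'
--                 )
--
--     # Incoming relationships
--     for rel_name, rel_info in RELATIONSHIPS.items():
--         if node_type in rel_info["targets"]:
--             inverse_name = _get_inverse_name(rel_name)
--             for source in rel_info["sources"]:
--                 field_name = _to_camel_case(inverse_name.lower()) + source
--                 lines.append(f"  # {rel_name} (inverse): {source} -> {node_type}")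
--                 lines.append(
--                     f'  {field_name}: [{source}!]! @relationship(type: "{rel_name}", direction: IN, properties: "{rel_info["properties"]}")'
--                 )
--
--     return lines
--
-- def _to_camel_case(snake_str: str) -> str:
--     """Convert snake_case to camelCase"""
--     components = snake_str.split('_')
--     return components[0] + ''.join(x.title() for x in components[1:])
--
-- def _get_inverse_name(rel_name: str) -> str:
--     """Get inverse relationship name"""
--     inverses = {
--         "CREATED_BY": "created",
--         "WORKS_AT": "employees",
--         "ASSIGNED_TO": "assignedTasks",
--         "MANAGED_BY": "managedProjects",
--         "CONTAINS": "containedIn",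
--         "PARTICIPATED_IN": "participants",
--         "BELONGS_TO": "has",
--         "RELATED_TO": "relatedTo",
--         "REFERENCES": "referencedBy",
--     }
--     return inverses.get(rel_name, rel_name.lower())
-- ===== SOURCE B (Python) =====
-- RELATIONSHIPS = {
--     "CREATED_BY": {
--         "properties": "CreatedByProperties",
--         "sources": ["Memory", "Project", "Task", "Insight", "Code"],
--         "targets": ["Person"],
--     },
--     "WORKS_AT": {
--         "properties": "WorksAtProperties",
--         "sources": ["Person"],
--         "targets": ["Company"],
--     },
--     "ASSIGNED_TO": {
--         "properties": "AssignedToProperties",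
--         "sources": ["Task"],
--         "targets": ["Person"],
--     },
--     "MANAGED_BY": {
--         "properties": "ManagedByProperties",
--         "sources": ["Project"],
--         "targets": ["Person"],
--     },
--     "CONTAINS": {
--         "properties": "ContainsProperties",
--         "sources": ["Project", "Meeting"],
--         "targets": ["Task", "Insight", "Memory"],
--     },
--     "PARTICIPATED_IN": {
--         "properties": "ParticipatedInProperties",
--         "sources": ["Person"],
--         "targets": ["Meeting", "Project"],
--     },
--     "BELONGS_TO": {
--         "properties": "BelongsToProperties",
--         "sources": ["Task", "Insight", "Opportunity"],
--         "targets": ["Project", "Company"],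
--     },
--     "RELATED_TO": {
--         "properties": "RelatedToProperties",
--         "sources": ["Insight", "Memory", "Task", "Opportunity"],
--         "targets": ["Insight", "Memory", "Task", "Opportunity"],
--     },
--     "REFERENCES": {
--         "properties": "ReferencesProperties",
--         "sources": ["Insight", "Memory", "Code"],
--         "targets": ["Project", "Task", "Code"],
--     },
-- }
--
-- _INVERSES = {
--     "CREATED_BY": "created",
--     "WORKS_AT": "employees",
--     "ASSIGNED_TO": "assignedTasks",
--     "MANAGED_BY": "managedProjects",
--     "CONTAINS": "containedIn",
--     "PARTICIPATED_IN": "participants",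
--     "BELONGS_TO": "has",
--     "RELATED_TO": "relatedTo",
--     "REFERENCES": "referencedBy",
-- }
--
--
-- def _camel(s: str) -> str:
--     # camelCase a lowercase snake_case name by a single character scan
--     out = []
--     up = False
--     for ch in s:
--         if ch == '_':
--             up = True
--         else:
--             out.append(ch.upper() if up else ch)
--             up = False
--     return ''.join(out)
--
--
-- def generate_relationships_for_node(node_type: str) -> list[str]:
--     """Generate all relationship fields for a given node type"""
--     outgoing: list[str] = []
--     incoming: list[str] = []
--     for rel_name, info in RELATIONSHIPS.items():
--         props = info["properties"]
--         if node_type in info["sources"]: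
--             prefix = _camel(rel_name.lower())
--             for target in info["targets"]:
--                 outgoing += [
--                     f"  # {rel_name}: {node_type} -> {target}",
--                     f'  {prefix}{target}: [{target}!]! @relationship(type: "{rel_name}", direction: OUT, properties: "{props}")',
--                 ]
--         if node_type in info["targets"]:
--             prefix = _camel(_INVERSES.get(rel_name, rel_name).lower())
--             for source in info["sources"]:
--                 incoming += [
--                     f"  # {rel_name} (inverse): {source} -> {node_type}",
--                     f'  {prefix}{source}: [{source}!]! @relationship(type: "{rel_name}", direction: IN, properties: "{props}")',
--                 ]
--     return [
--         "",
--         "  # ========================================",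
--         f"  # Relationships for {node_type}",
--         "  # ========================================",
--     ] + outgoing + incoming
-- ===== Notes on version B (the rewrite author's own statement) =====
-- stated objective: alternative
-- what changed: A's two separate scans over RELATIONSHIPS (outgoing then incoming) are fused into one pass that maintains separate outgoing/incoming accumulators and concatenates them after the header, and the split/title/join camel-case helper is replaced by a single character scan that drops underscores and upper-cases the following character.
import Mathlib
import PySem

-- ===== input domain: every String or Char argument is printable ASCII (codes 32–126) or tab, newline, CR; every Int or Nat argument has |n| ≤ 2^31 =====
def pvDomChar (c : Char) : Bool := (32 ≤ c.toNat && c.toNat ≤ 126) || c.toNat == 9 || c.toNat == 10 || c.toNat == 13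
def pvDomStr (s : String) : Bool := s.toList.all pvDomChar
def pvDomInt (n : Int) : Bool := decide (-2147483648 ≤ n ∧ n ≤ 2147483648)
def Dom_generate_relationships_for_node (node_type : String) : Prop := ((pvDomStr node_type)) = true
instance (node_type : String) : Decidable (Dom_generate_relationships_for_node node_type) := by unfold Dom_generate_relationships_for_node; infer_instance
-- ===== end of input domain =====

-- B fuses A's two scans over RELATIONSHIPS into one pass with separate outgoing/incoming
-- accumulators and replaces the split/title camel-case pipeline by a single character scan
-- (objective: alternative decomposition; same output).


-- ===== PORT A =====
-- RELATIONSHIPS : dict rel_name -> (properties, sources, targets)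
def pyRELATIONSHIPS : PySem.Dict String (String × List String × List String) :=
  PySem.Dict.ofList [
    ("CREATED_BY", ("CreatedByProperties", ["Memory", "Project", "Task", "Insight", "Code"], ["Person"])),
    ("WORKS_AT", ("WorksAtProperties", ["Person"], ["Company"])),
    ("ASSIGNED_TO", ("AssignedToProperties", ["Task"], ["Person"])),
    ("MANAGED_BY", ("ManagedByProperties", ["Project"], ["Person"])),
    ("CONTAINS", ("ContainsProperties", ["Project", "Meeting"], ["Task", "Insight", "Memory"])),
    ("PARTICIPATED_IN", ("ParticipatedInProperties", ["Person"], ["Meeting", "Project"])),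
    ("BELONGS_TO", ("BelongsToProperties", ["Task", "Insight", "Opportunity"], ["Project", "Company"])),
    ("RELATED_TO", ("RelatedToProperties", ["Insight", "Memory", "Task", "Opportunity"], ["Insight", "Memory", "Task", "Opportunity"])),
    ("REFERENCES", ("ReferencesProperties", ["Insight", "Memory", "Code"], ["Project", "Task", "Code"]))]

-- hand port of str.title(), exact on the printable-ASCII domain (a char is upper-cased
-- when the previous char is not alphabetic, lower-cased otherwise)
def pyTitleChars : List Char → Bool → List Char
  | [], _ => []
  | c :: rest, prevAlpha =>
      (if prevAlpha then PySem.Chars.lowerChar c else PySem.Chars.upperChar c)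
        :: pyTitleChars rest (PySem.Chars.isalpha c)

def pyTitle (s : String) : String := String.ofList (pyTitleChars s.toList false)

def to_camel_case (snake_str : String) : String :=
  match PySem.Str.split? snake_str "_" with
  | none => ""          -- unreachable: the separator "_" is non-empty
  | some [] => ""       -- unreachable: split never returns an empty list
  | some (c0 :: rest) => c0 ++ PySem.Str.join "" (rest.map pyTitle)

def get_inverse_name (rel_name : String) : String :=
  (PySem.Dict.ofList [
    ("CREATED_BY", "created"), ("WORKS_AT", "employees"), ("ASSIGNED_TO", "assignedTasks"),
    ("MANAGED_BY", "managedProjects"), ("CONTAINS", "containedIn"),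
    ("PARTICIPATED_IN", "participants"), ("BELONGS_TO", "has"),
    ("RELATED_TO", "relatedTo"), ("REFERENCES", "referencedBy")]).getD rel_name
      (PySem.Str.lower rel_name)

def generate_relationships_for_node (node_type : String) : List String :=
  let lines : List String := []
  let lines := lines ++ [""]
  let lines := lines ++ ["  # ========================================"]
  let lines := lines ++ ["  # Relationships for " ++ node_type]
  let lines := lines ++ ["  # ========================================"]
  -- Outgoing relationships
  let lines := pyRELATIONSHIPS.items.foldl (fun lines ri =>
    if ri.2.2.1.contains node_type then
      ri.2.2.2.foldl (fun lines target =>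
        let field_name := to_camel_case (PySem.Str.lower ri.1) ++ target
        let lines := lines ++ ["  # " ++ ri.1 ++ ": " ++ node_type ++ " -> " ++ target]
        lines ++ ["  " ++ field_name ++ ": [" ++ target ++ "!]! @relationship(type: \"" ++ ri.1 ++ "\", direction: OUT, properties: \"" ++ ri.2.1 ++ "\")"]) lines
    else lines) lines
  -- Incoming relationships
  let lines := pyRELATIONSHIPS.items.foldl (fun lines ri =>
    if ri.2.2.2.contains node_type then
      ri.2.2.1.foldl (fun lines source =>
        let field_name := to_camel_case (PySem.Str.lower (get_inverse_name ri.1)) ++ source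
        let lines := lines ++ ["  # " ++ ri.1 ++ " (inverse): " ++ source ++ " -> " ++ node_type]
        lines ++ ["  " ++ field_name ++ ": [" ++ source ++ "!]! @relationship(type: \"" ++ ri.1 ++ "\", direction: IN, properties: \"" ++ ri.2.1 ++ "\")"]) lines
    else lines) lines
  lines

-- ===== PORT B =====
def bINVERSES : PySem.Dict String String :=
  PySem.Dict.ofList [
    ("CREATED_BY", "created"), ("WORKS_AT", "employees"), ("ASSIGNED_TO", "assignedTasks"),
    ("MANAGED_BY", "managedProjects"), ("CONTAINS", "containedIn"),
    ("PARTICIPATED_IN", "participants"), ("BELONGS_TO", "has"),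
    ("RELATED_TO", "relatedTo"), ("REFERENCES", "referencedBy")]

-- single character scan: drop '_', upper-case the char that follows one
def bCamelChars : List Char → Bool → List Char
  | [], _ => []
  | c :: rest, up =>
      if c = '_' then bCamelChars rest true
      else (if up then PySem.Chars.upperChar c else c) :: bCamelChars rest false

def bCamel (s : String) : String := String.ofList (bCamelChars s.toList false)

def generate_relationships_for_node_alt (node_type : String) : List String :=
  let acc := pyRELATIONSHIPS.items.foldl (fun (acc : List String × List String) ri =>
    (if ri.2.2.1.contains node_type then
        ri.2.2.2.foldl (fun outgoing target =>
          outgoing ++ ["  # " ++ ri.1 ++ ": " ++ node_type ++ " -> " ++ target,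
            "  " ++ bCamel (PySem.Str.lower ri.1) ++ target ++ ": [" ++ target ++ "!]! @relationship(type: \"" ++ ri.1 ++ "\", direction: OUT, properties: \"" ++ ri.2.1 ++ "\")"]) acc.1
      else acc.1,
     if ri.2.2.2.contains node_type then
        ri.2.2.1.foldl (fun incoming source =>
          incoming ++ ["  # " ++ ri.1 ++ " (inverse): " ++ source ++ " -> " ++ node_type,
            "  " ++ bCamel (PySem.Str.lower (bINVERSES.getD ri.1 ri.1)) ++ source ++ ": [" ++ source ++ "!]! @relationship(type: \"" ++ ri.1 ++ "\", direction: IN, properties: \"" ++ ri.2.1 ++ "\")"]) acc.2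
      else acc.2)) ([], [])
  ["", "  # ========================================",
   "  # Relationships for " ++ node_type,
   "  # ========================================"] ++ acc.1 ++ acc.2

-- ===== PRECONDITION & SPEC =====
def Spec_generate_relationships_for_node (node_type : String) (out : List String) : Prop := out = generate_relationships_for_node_alt node_type
instance (node_type : String) (out : List String) : Decidable (Spec_generate_relationships_for_node node_type out) := by unfold Spec_generate_relationships_for_node; infer_instance

-- ===== CLAIM (what is proved, stated in full; the proofs are below) =====
def Claim_equal_generate_relationships_for_node : Prop := ∀ (node_type : String), Dom_generate_relationships_for_node node_type → Spec_generate_relationships_for_node node_type (generate_relationships_for_node node_type)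

-- ===== LEMMAS AND PROOFS =====

-- A's guarded outer loop shape
theorem foldA {α β : Type} (l : List α) (c : α → Bool) (ts : α → List β)
    (s1 s2 : α → β → String) (init : List String) :
    l.foldl (fun lines ri =>
        if c ri then (ts ri).foldl (fun lines t => (lines ++ [s1 ri t]) ++ [s2 ri t]) lines
        else lines) init
      = init ++ l.flatMap (fun ri =>
          if c ri then (ts ri).flatMap (fun t => [s1 ri t, s2 ri t]) else []) := by
  induction l generalizing init with
  | nil => simp
  | cons x xs ih =>
    simp only [List.foldl_cons, List.flatMap_cons, ih]
    split <;> simp [List.append_assoc, List.flatMap]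

-- B's fused loop with a pair of accumulators
theorem foldB {α β : Type} (l : List α) (c d : α → Bool) (ts ss : α → List β)
    (o1 o2 i1 i2 : α → β → String) (a b : List String) :
    l.foldl (fun (acc : List String × List String) ri =>
        (if c ri then (ts ri).foldl (fun out t => out ++ [o1 ri t, o2 ri t]) acc.1 else acc.1,
         if d ri then (ss ri).foldl (fun inc s => inc ++ [i1 ri s, i2 ri s]) acc.2 else acc.2)) (a, b)
      = (a ++ l.flatMap (fun ri => if c ri then (ts ri).flatMap (fun t => [o1 ri t, o2 ri t]) else []),
         b ++ l.flatMap (fun ri => if d ri then (ss ri).flatMap (fun s => [i1 ri s, i2 ri s]) else [])) := by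
  induction l generalizing a b with
  | nil => simp
  | cons x xs ih =>
    simp only [List.foldl_cons]
    rw [ih]
    simp only [List.flatMap_cons]
    refine Prod.ext ?_ ?_ <;> (dsimp only; split <;>
      simp [List.append_assoc, List.flatMap])

theorem items_eval : pyRELATIONSHIPS.items = [
    ("CREATED_BY", ("CreatedByProperties", ["Memory", "Project", "Task", "Insight", "Code"], ["Person"])),
    ("WORKS_AT", ("WorksAtProperties", ["Person"], ["Company"])),
    ("ASSIGNED_TO", ("AssignedToProperties", ["Task"], ["Person"])),
    ("MANAGED_BY", ("ManagedByProperties", ["Project"], ["Person"])),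
    ("CONTAINS", ("ContainsProperties", ["Project", "Meeting"], ["Task", "Insight", "Memory"])),
    ("PARTICIPATED_IN", ("ParticipatedInProperties", ["Person"], ["Meeting", "Project"])),
    ("BELONGS_TO", ("BelongsToProperties", ["Task", "Insight", "Opportunity"], ["Project", "Company"])),
    ("RELATED_TO", ("RelatedToProperties", ["Insight", "Memory", "Task", "Opportunity"], ["Insight", "Memory", "Task", "Opportunity"])),
    ("REFERENCES", ("ReferencesProperties", ["Insight", "Memory", "Code"], ["Project", "Task", "Code"]))] := by decide

theorem camA0 : to_camel_case (PySem.Str.lower "CREATED_BY") = "createdBy" := by decide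

theorem camB0 : bCamel (PySem.Str.lower "CREATED_BY") = "createdBy" := by decide

theorem invA0 : to_camel_case (PySem.Str.lower (get_inverse_name "CREATED_BY")) = "created" := by decide

theorem invB0 : bCamel (PySem.Str.lower (bINVERSES.getD "CREATED_BY" "CREATED_BY")) = "created" := by decide

theorem camA1 : to_camel_case (PySem.Str.lower "WORKS_AT") = "worksAt" := by decide

theorem camB1 : bCamel (PySem.Str.lower "WORKS_AT") = "worksAt" := by decide

theorem invA1 : to_camel_case (PySem.Str.lower (get_inverse_name "WORKS_AT")) = "employees" := by decide

theorem invB1 : bCamel (PySem.Str.lower (bINVERSES.getD "WORKS_AT" "WORKS_AT")) = "employees" := by decide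

theorem camA2 : to_camel_case (PySem.Str.lower "ASSIGNED_TO") = "assignedTo" := by decide

theorem camB2 : bCamel (PySem.Str.lower "ASSIGNED_TO") = "assignedTo" := by decide

theorem invA2 : to_camel_case (PySem.Str.lower (get_inverse_name "ASSIGNED_TO")) = "assignedtasks" := by decide

theorem invB2 : bCamel (PySem.Str.lower (bINVERSES.getD "ASSIGNED_TO" "ASSIGNED_TO")) = "assignedtasks" := by decide

theorem camA3 : to_camel_case (PySem.Str.lower "MANAGED_BY") = "managedBy" := by decide

theorem camB3 : bCamel (PySem.Str.lower "MANAGED_BY") = "managedBy" := by decide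

theorem invA3 : to_camel_case (PySem.Str.lower (get_inverse_name "MANAGED_BY")) = "managedprojects" := by decide

theorem invB3 : bCamel (PySem.Str.lower (bINVERSES.getD "MANAGED_BY" "MANAGED_BY")) = "managedprojects" := by decide

theorem camA4 : to_camel_case (PySem.Str.lower "CONTAINS") = "contains" := by decide

theorem camB4 : bCamel (PySem.Str.lower "CONTAINS") = "contains" := by decide

theorem invA4 : to_camel_case (PySem.Str.lower (get_inverse_name "CONTAINS")) = "containedin" := by decide

theorem invB4 : bCamel (PySem.Str.lower (bINVERSES.getD "CONTAINS" "CONTAINS")) = "containedin" := by decide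

theorem camA5 : to_camel_case (PySem.Str.lower "PARTICIPATED_IN") = "participatedIn" := by decide

theorem camB5 : bCamel (PySem.Str.lower "PARTICIPATED_IN") = "participatedIn" := by decide

theorem invA5 : to_camel_case (PySem.Str.lower (get_inverse_name "PARTICIPATED_IN")) = "participants" := by decide

theorem invB5 : bCamel (PySem.Str.lower (bINVERSES.getD "PARTICIPATED_IN" "PARTICIPATED_IN")) = "participants" := by decide

theorem camA6 : to_camel_case (PySem.Str.lower "BELONGS_TO") = "belongsTo" := by decide

theorem camB6 : bCamel (PySem.Str.lower "BELONGS_TO") = "belongsTo" := by decide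

theorem invA6 : to_camel_case (PySem.Str.lower (get_inverse_name "BELONGS_TO")) = "has" := by decide

theorem invB6 : bCamel (PySem.Str.lower (bINVERSES.getD "BELONGS_TO" "BELONGS_TO")) = "has" := by decide

theorem camA7 : to_camel_case (PySem.Str.lower "RELATED_TO") = "relatedTo" := by decide

theorem camB7 : bCamel (PySem.Str.lower "RELATED_TO") = "relatedTo" := by decide

theorem invA7 : to_camel_case (PySem.Str.lower (get_inverse_name "RELATED_TO")) = "relatedto" := by decide

theorem invB7 : bCamel (PySem.Str.lower (bINVERSES.getD "RELATED_TO" "RELATED_TO")) = "relatedto" := by decide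

theorem camA8 : to_camel_case (PySem.Str.lower "REFERENCES") = "references" := by decide

theorem camB8 : bCamel (PySem.Str.lower "REFERENCES") = "references" := by decide

theorem invA8 : to_camel_case (PySem.Str.lower (get_inverse_name "REFERENCES")) = "referencedby" := by decide

theorem invB8 : bCamel (PySem.Str.lower (bINVERSES.getD "REFERENCES" "REFERENCES")) = "referencedby" := by decide

-- ===== VERDICT (by name: the statement is the Claim_ definition above) =====
set_option maxRecDepth 8192 in
theorem generate_relationships_for_node_spec : Claim_equal_generate_relationships_for_node := by
  intro nt _
  unfold Spec_generate_relationships_for_node generate_relationships_for_node generate_relationships_for_node_alt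
  simp only []
  rw [foldA, foldA, foldB]
  rw [items_eval]
  simp only [List.flatMap_cons, List.flatMap_nil,
    camA0, camB0, invA0, invB0, camA1, camB1, invA1, invB1, camA2, camB2, invA2, invB2, camA3, camB3, invA3, invB3, camA4, camB4, invA4, invB4, camA5, camB5, invA5, invB5, camA6, camB6, invA6, invB6, camA7, camB7, invA7, invB7, camA8, camB8, invA8, invB8]
  simp [List.append_assoc, String.append_assoc]
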